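-- pv_equiv track=rewrite | github.com/Akarsh-2004/vestir_designer | vestir-prototype/vision-sidecar/app.py | _infer_pattern_from_caption
-- ===== SOURCE A (Python) =====
-- def _infer_pattern_from_caption(caption: str) -> str:
--     """Map Florence caption keywords to schema pattern (Gemini PATTERN_ENUM compatible)."""
--     if any(k in caption for k in ("plaid", "tartan", "checkered", "gingham")):
--         if "gingham" in caption or "check" in caption:
--             return "check"
--         return "plaid"
--     if any(k in caption for k in ("stripe", "striped", "pinstripe")):
--         return "stripe"
--     if any(k in caption for k in ("floral", "flower", "botanical", "paisley")):
--         return "floral"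
--     if any(k in caption for k in ("graphic", "logo", "print", "slogan", "illustration")):
--         return "graphic"
--     if any(k in caption for k in ("texture", "ribbed", "quilted", "corduroy", "velvet", "sequin", "mesh", "lace")):
--         return "texture"
--     if "camouflage" in caption or "camo" in caption:
--         return "mixed"
--     return "solid"
-- ===== SOURCE B (Python) =====
-- # B: flat keyword->priority map with a running-min selection, label resolved by
-- # table lookup afterwards (A: ordered group-by-group early-return branching).
--
-- _PRIORITY = {
--     "plaid": 0, "tartan": 0, "checkered": 0, "gingham": 0,
--     "stripe": 1, "striped": 1, "pinstripe": 1,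
--     "floral": 2, "flower": 2, "botanical": 2, "paisley": 2,
--     "graphic": 3, "logo": 3, "print": 3, "slogan": 3, "illustration": 3,
--     "texture": 4, "ribbed": 4, "quilted": 4, "corduroy": 4, "velvet": 4,
--     "sequin": 4, "mesh": 4, "lace": 4,
--     "camouflage": 5, "camo": 5,
-- }
-- _LABELS = ("plaid", "stripe", "floral", "graphic", "texture", "mixed", "solid")
--
--
-- def _infer_pattern_from_caption(caption: str) -> str:
--     """Map Florence caption keywords to schema pattern (Gemini PATTERN_ENUM compatible)."""
--     best = len(_LABELS) - 1  # index of "solid"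
--     for kw, pri in _PRIORITY.items():
--         if pri < best and kw in caption:
--             best = pri
--     if best == 0 and ("gingham" in caption or "check" in caption):
--         return "check"
--     return _LABELS[best]
-- ===== Notes on version B (the rewrite author's own statement) =====
-- stated objective: alternative
-- what changed: Replaces A's ordered chain of group-level early-return branches with a flat keyword-to-priority map scanned once with a running minimum, the label then read from a tuple indexed by the winning priority (plaid vs check resolved after selection).
import Mathlib
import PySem

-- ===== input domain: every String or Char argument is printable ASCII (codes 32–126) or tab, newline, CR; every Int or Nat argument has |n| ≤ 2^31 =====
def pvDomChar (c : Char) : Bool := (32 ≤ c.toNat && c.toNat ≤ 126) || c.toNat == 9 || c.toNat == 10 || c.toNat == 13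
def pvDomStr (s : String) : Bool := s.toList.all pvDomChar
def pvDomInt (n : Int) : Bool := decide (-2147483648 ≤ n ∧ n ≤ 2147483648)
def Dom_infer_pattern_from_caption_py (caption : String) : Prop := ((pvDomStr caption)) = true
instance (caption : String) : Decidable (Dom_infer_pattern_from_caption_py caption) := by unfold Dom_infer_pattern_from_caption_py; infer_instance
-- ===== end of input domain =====

-- B replaces A's ordered early-return group branches by a running-min selection over a flat keyword->priority map plus a label table lookup (alternative decomposition, same cost).


-- ===== PORT A =====
def infer_pattern_from_caption_py (caption : String) : String :=
  if ["plaid", "tartan", "checkered", "gingham"].any (fun k => PySem.Str.isIn k caption) then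
    if PySem.Str.isIn "gingham" caption || PySem.Str.isIn "check" caption then "check"
    else "plaid"
  else if ["stripe", "striped", "pinstripe"].any (fun k => PySem.Str.isIn k caption) then "stripe"
  else if ["floral", "flower", "botanical", "paisley"].any (fun k => PySem.Str.isIn k caption) then "floral"
  else if ["graphic", "logo", "print", "slogan", "illustration"].any (fun k => PySem.Str.isIn k caption) then "graphic"
  else if ["texture", "ribbed", "quilted", "corduroy", "velvet", "sequin", "mesh", "lace"].any (fun k => PySem.Str.isIn k caption) then "texture"
  else if PySem.Str.isIn "camouflage" caption || PySem.Str.isIn "camo" caption then "mixed"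
  else "solid"

-- ===== PORT B =====
-- flat keyword -> priority map (Python dict _PRIORITY, insertion order)
def pvPriority : List (String × Nat) :=
  [("plaid", 0), ("tartan", 0), ("checkered", 0), ("gingham", 0),
   ("stripe", 1), ("striped", 1), ("pinstripe", 1),
   ("floral", 2), ("flower", 2), ("botanical", 2), ("paisley", 2),
   ("graphic", 3), ("logo", 3), ("print", 3), ("slogan", 3), ("illustration", 3),
   ("texture", 4), ("ribbed", 4), ("quilted", 4), ("corduroy", 4), ("velvet", 4),
   ("sequin", 4), ("mesh", 4), ("lace", 4),
   ("camouflage", 5), ("camo", 5)]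

def pvLabels : List String :=
  ["plaid", "stripe", "floral", "graphic", "texture", "mixed", "solid"]

def infer_pattern_from_caption_py_alt (caption : String) : String :=
  let best := pvPriority.foldl
    (fun b kp => if kp.2 < b ∧ PySem.Str.isIn kp.1 caption then kp.2 else b)
    (pvLabels.length - 1)
  if best = 0 ∧ (PySem.Str.isIn "gingham" caption || PySem.Str.isIn "check" caption) then "check"
  -- _LABELS[best]: best ≤ 6 always holds, so the plain in-range lookup is exact
  else pvLabels.getD best ""

-- ===== PRECONDITION & SPEC =====
def Spec_infer_pattern_from_caption_py (caption : String) (out : String) : Prop := out = infer_pattern_from_caption_py_alt caption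
instance (caption : String) (out : String) : Decidable (Spec_infer_pattern_from_caption_py caption out) := by unfold Spec_infer_pattern_from_caption_py; infer_instance

-- ===== CLAIM (what is proved, stated in full; the proofs are below) =====
def Claim_equal_infer_pattern_from_caption_py : Prop := ∀ (caption : String), Dom_infer_pattern_from_caption_py caption → Spec_infer_pattern_from_caption_py caption (infer_pattern_from_caption_py caption)

-- ===== LEMMAS AND PROOFS =====

-- pvPriority grouped by priority: lets foldl_append split B's single fold into its six constant-priority segments
theorem pvPriority_grouped :
    pvPriority =
      (["plaid", "tartan", "checkered", "gingham"].map (fun k => (k, 0)))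
      ++ (["stripe", "striped", "pinstripe"].map (fun k => (k, 1)))
      ++ (["floral", "flower", "botanical", "paisley"].map (fun k => (k, 2)))
      ++ (["graphic", "logo", "print", "slogan", "illustration"].map (fun k => (k, 3)))
      ++ (["texture", "ribbed", "quilted", "corduroy", "velvet", "sequin", "mesh", "lace"].map (fun k => (k, 4)))
      ++ (["camouflage", "camo"].map (fun k => (k, 5))) := by
  rfl

-- the running-min fold over one constant-priority group
theorem fold_const_group (caption : String) (p : Nat) (kws : List String) (b : Nat) :
    ((kws.map (fun k => (k, p))).foldl
        (fun b kp => if kp.2 < b ∧ PySem.Str.isIn kp.1 caption then kp.2 else b) b)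
      = if p < b ∧ kws.any (fun k => PySem.Str.isIn k caption) then p else b := by
  induction kws generalizing b with
  | nil => simp
  | cons k ks ih =>
    simp only [List.map_cons, List.foldl_cons, ih, List.any_cons, Bool.or_eq_true]
    by_cases hk : PySem.Str.isIn k caption = true <;>
      by_cases hp : p < b <;>
        simp only [hk, hp, and_true, and_false, true_and, false_and, true_or, false_or,
          if_true, if_false, Bool.false_eq_true] <;>
        split_ifs <;> omega

-- ===== VERDICT (by name: the statement is the Claim_ definition above) =====
theorem infer_pattern_from_caption_py_spec : Claim_equal_infer_pattern_from_caption_py := by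
  intro caption _
  unfold Spec_infer_pattern_from_caption_py infer_pattern_from_caption_py infer_pattern_from_caption_py_alt
  rw [pvPriority_grouped]
  simp only [List.foldl_append, fold_const_group]
  have e5 : (PySem.Str.isIn "camouflage" caption || PySem.Str.isIn "camo" caption)
      = (["camouflage", "camo"].any fun k => PySem.Str.isIn k caption) := by
    simp only [List.any_cons, List.any_nil, Bool.or_false]
  rw [e5]
  generalize (["plaid", "tartan", "checkered", "gingham"].any fun k => PySem.Str.isIn k caption) = g0
  generalize (["stripe", "striped", "pinstripe"].any fun k => PySem.Str.isIn k caption) = g1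
  generalize (["floral", "flower", "botanical", "paisley"].any fun k => PySem.Str.isIn k caption) = g2
  generalize (["graphic", "logo", "print", "slogan", "illustration"].any fun k => PySem.Str.isIn k caption) = g3
  generalize (["texture", "ribbed", "quilted", "corduroy", "velvet", "sequin", "mesh", "lace"].any fun k => PySem.Str.isIn k caption) = g4
  generalize (["camouflage", "camo"].any fun k => PySem.Str.isIn k caption) = g5
  generalize (PySem.Str.isIn "gingham" caption || PySem.Str.isIn "check" caption) = c
  revert g0 g1 g2 g3 g4 g5 c
  decide
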